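-- pv_equiv track=rewrite | github.com/zhaozhenyu-newsbreak/sensitive_detect | process.py | is_in_ngram
-- ===== SOURCE A (Python) =====
-- def is_in_ngram(words,dic):
--     res = {}
--     for word in words:
--         if word in dic:
--             res[word] = 1
--     doc = ' '.join(words)
--     for key in dic:
--         if len(key.split(' '))>1:
--             if key in doc:
--                 res[key] = 1
--     return res
-- ===== SOURCE B (Python) =====
-- def is_in_ngram(words, dic):
--     doc = ' '.join(words)
--     # multiword keys, grouped by first character (they contain ' ', hence are non-empty)
--     multis = [k for k in dic if len(k.split(' ')) > 1]
--     byfirst = {}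
--     for k in multis:
--         byfirst.setdefault(k[0], []).append(k)
--     # single left-to-right scan of doc, matching all pending patterns whose first
--     # character occurs here; a pattern is retired into `found` on its first match
--     found = set()
--     for i, c in enumerate(doc):
--         for k in byfirst.get(c, []):
--             if k not in found and doc.startswith(k, i):
--                 found.add(k)
--     hits = list(dict.fromkeys(w for w in words if w in dic))
--     seen = set(hits)
--     hits += [k for k in multis if k not in seen and k in found]
--     return dict.fromkeys(hits, 1)
-- ===== Notes on version B (the rewrite author's own statement) =====
-- stated objective: alternative
-- what changed: B replaces A's per-key substring search ('key in doc' once for every multiword key) by a single left-to-right scan of the joined doc that matches all multiword patterns simultaneously via a first-character bucket index, collecting matches into a set; the result is then assembled as ordered word hits plus the matched multiword keys in dic order.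
import Mathlib
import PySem

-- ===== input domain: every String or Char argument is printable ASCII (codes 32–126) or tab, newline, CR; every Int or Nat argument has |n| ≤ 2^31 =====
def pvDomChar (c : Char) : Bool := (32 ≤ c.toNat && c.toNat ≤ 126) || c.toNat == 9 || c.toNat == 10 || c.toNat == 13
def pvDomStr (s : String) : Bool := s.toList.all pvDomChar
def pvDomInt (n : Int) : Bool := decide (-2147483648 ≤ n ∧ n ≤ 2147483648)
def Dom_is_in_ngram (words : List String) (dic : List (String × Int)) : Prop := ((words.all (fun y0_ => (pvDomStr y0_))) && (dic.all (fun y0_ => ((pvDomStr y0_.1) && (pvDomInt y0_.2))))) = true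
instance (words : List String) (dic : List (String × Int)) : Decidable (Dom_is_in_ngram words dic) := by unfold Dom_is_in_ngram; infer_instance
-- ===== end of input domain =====

-- B replaces A's per-key substring search over doc by one left-to-right scan of the joined
-- doc matching all multiword patterns at once through a first-character bucket index;
-- objective: alternative algorithm (simultaneous multi-pattern matching).

-- ===== PORT A =====
def is_in_ngram (words : List String) (dic : List (String × Int)) : List (String × Int) :=
  let res : PySem.Dict String Int :=
    words.foldl (fun r word =>
      if (dic.map Prod.fst).contains word then r.insert word 1 else r) PySem.Dict.empty
  let doc := PySem.Str.join " " words
  let res :=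
    (dic.map Prod.fst).foldl (fun r key =>
      if (PySem.Chars.splitOn key.toList [' ']).length > 1 then
        (if PySem.Str.isIn key doc then r.insert key 1 else r)
      else r) res
  res.items

-- ===== PORT B =====
def is_in_ngram_alt (words : List String) (dic : List (String × Int)) : List (String × Int) :=
  let doc := PySem.Str.join " " words
  let multis := (dic.map Prod.fst).filter (fun k =>
    decide ((PySem.Chars.splitOn k.toList [' ']).length > 1))
  -- Source B's k[0]: multiword keys contain ' ', hence are non-empty, so headD's default is never used
  let byfirst : PySem.Dict Char (List String) :=
    multis.foldl (fun d k => d.modify (k.toList.headD ' ') [] (fun l => l ++ [k]))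
      PySem.Dict.empty
  -- doc.startswith(k, i) with 0 ≤ i < len(doc) is exactly startswith on doc's i-th suffix
  let found : PySem.Set String :=
    (PySem.List.enumerate doc.toList).foldl (fun f ic =>
      (byfirst.getD ic.2 []).foldl (fun f k =>
        if !(PySem.Set.contains f k)
            && PySem.Chars.startswith (doc.toList.drop ic.1.toNat) k.toList
        then PySem.Set.add f k else f) f) PySem.Set.empty
  let hits : List String :=
    PySem.List.dedup (words.filter (fun w => (dic.map Prod.fst).contains w))
  let seen : PySem.Set String := PySem.Set.ofList hits
  let hits2 := hits ++ multis.filter (fun k =>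
    !(PySem.Set.contains seen k) && PySem.Set.contains found k)
  (PySem.List.dedup hits2).map (fun k => (k, (1 : Int)))

-- ===== PRECONDITION & SPEC =====
def Spec_is_in_ngram (words : List String) (dic : List (String × Int)) (out : List (String × Int)) : Prop := out = is_in_ngram_alt words dic
instance (words : List String) (dic : List (String × Int)) (out : List (String × Int)) : Decidable (Spec_is_in_ngram words dic out) := by unfold Spec_is_in_ngram; infer_instance

-- ===== CLAIM (what is proved, stated in full; the proofs are below) =====
def Claim_equal_is_in_ngram : Prop := ∀ (words : List String) (dic : List (String × Int)), Dom_is_in_ngram words dic → Spec_is_in_ngram words dic (is_in_ngram words dic)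

-- ===== LEMMAS AND PROOFS =====

-- Folding `insert k 1` over ks, starting from a dict whose items are m paired with 1,
-- yields exactly the ordered-dedup extension of m by ks (all values are 1, so an
-- overwrite changes nothing).
theorem fold_insert_one (ks m : List String) :
    ks.foldl (fun d k => d.insert k (1 : Int))
      (PySem.Dict.mk (m.map (fun k => (k, (1 : Int)))))
    = PySem.Dict.mk ((PySem.Set.update m ks).map (fun k => (k, (1 : Int)))) := by
  induction ks generalizing m with
  | nil => simp [PySem.Set.update]
  | cons k ks ih =>
    have hstep : (PySem.Dict.mk (m.map (fun k => (k, (1 : Int))))).insert k 1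
        = PySem.Dict.mk ((PySem.Set.add m k).map (fun k => (k, (1 : Int)))) := by
      apply PySem.Dict.ext
      rw [PySem.Dict.items_insert]
      by_cases hm : k ∈ m
      · have hc : (PySem.Dict.mk (m.map (fun k => (k, (1 : Int))))).contains k = true := by
          simp only [PySem.Dict.contains_mk, List.any_map, List.any_eq_true]
          exact ⟨k, hm, by simp⟩
        rw [if_pos hc]
        have : PySem.Set.add m k = m := PySem.Set.add_of_mem hm
        rw [this]
        simp only [List.map_map]
        apply List.map_congr_left
        intro x hx
        by_cases hxk : x = k <;> simp [hxk]
      · have hc : (PySem.Dict.mk (m.map (fun k => (k, (1 : Int))))).contains k = false := by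
          simp only [PySem.Dict.contains_mk, List.any_map, List.any_eq_false]
          intro x hxm
          simp only [Function.comp_apply, beq_iff_eq]
          intro hxk
          exact hm (hxk ▸ hxm)
        rw [if_neg (by simp [hc])]
        have : PySem.Set.add m k = m ++ [k] := by
          simp only [PySem.Set.add, PySem.Set.contains]
          rw [if_neg (by simpa using hm)]
        simp [this]
    rw [List.foldl_cons, hstep, ih]
    simp [PySem.Set.update]

-- Filtering out elements already in s is invisible to Set.update from any superset of s.
theorem update_filter_drop_seen (p : String → Bool) (s : List String) :
    ∀ (ks : List String) (m : PySem.Set String), (∀ x ∈ s, x ∈ m) →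
    PySem.Set.update m (ks.filter p)
      = PySem.Set.update m (ks.filter (fun k => p k && !(s.contains k))) := by
  intro ks
  induction ks with
  | nil => intro m _; rfl
  | cons k ks ih =>
    intro m hsub
    by_cases hp : p k = true
    · by_cases hs : s.contains k = true
      · have hm : k ∈ m := hsub k (by simpa using hs)
        have h1 : PySem.Set.add m k = m := PySem.Set.add_of_mem hm
        simp only [List.filter_cons, hp, hs, Bool.not_true, Bool.and_false,
          if_true, Bool.false_eq_true, if_false]
        simp only [PySem.Set.update, List.foldl_cons, h1]
        exact ih m hsub
      · have hs' : s.contains k = false := by simpa using hs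
        simp only [List.filter_cons, hp, hs', Bool.not_false, Bool.and_true,
          if_true]
        simp only [PySem.Set.update, List.foldl_cons]
        refine ih (PySem.Set.add m k) ?_
        intro x hx
        have hxm : x ∈ m := hsub x hx
        simp only [PySem.Set.add]
        split <;> simp [hxm]
    · have hp' : p k = false := by simpa using hp
      simp only [List.filter_cons, hp', Bool.false_and, Bool.false_eq_true, if_false]
      exact ih m hsub

-- A multiword key (its split on ' ' has more than one part) is non-empty.
theorem multiword_ne_nil (k : String)
    (h : (PySem.Chars.splitOn k.toList [' ']).length > 1) : k.toList ≠ [] := by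
  intro hnil
  rw [hnil] at h
  norm_num [show (PySem.Chars.splitOn ([] : List Char) [' ']).length = 1 from rfl] at h

-- Membership in one bucket of B's first-character index.
theorem mem_bucket (multis : List String) (c : Char) (k : String) :
    k ∈ (multis.foldl (fun d k => d.modify (k.toList.headD ' ') [] (fun l => l ++ [k]))
          PySem.Dict.empty).getD c []
      ↔ k ∈ multis ∧ k.toList.headD ' ' = c := by
  have hmap : multis.foldl
        (fun d k => d.modify (k.toList.headD ' ') [] (fun l => l ++ [k]))
        (PySem.Dict.empty : PySem.Dict Char (List String))
      = (multis.map (fun k => (k.toList.headD ' ', k))).foldl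
          (fun d p => d.modify p.1 [] (fun l => l ++ [p.2])) PySem.Dict.empty := by
    rw [List.foldl_map]
  rw [hmap, PySem.Dict.getD_foldl_modify_append, PySem.Dict.getD_empty]
  simp only [List.nil_append, List.mem_map, List.mem_filter]
  constructor
  · rintro ⟨p, ⟨⟨x, hx, rfl⟩, hc⟩, rfl⟩
    exact ⟨hx, by simpa using hc⟩
  · rintro ⟨hk, hc⟩
    exact ⟨(c, k), ⟨⟨k, hk, by rw [hc]⟩, by simp⟩, rfl⟩

-- One position of B's scan: the inner fold adds exactly the bucket patterns matching here.
theorem mem_inner_scan (doc : List Char) (i : Nat) (bucket : List String)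
    (f : PySem.Set String) (k : String) :
    k ∈ bucket.foldl (fun f k =>
        if !(PySem.Set.contains f k) && PySem.Chars.startswith (doc.drop i) k.toList
        then PySem.Set.add f k else f) f
      ↔ k ∈ f ∨ (k ∈ bucket ∧ PySem.Chars.startswith (doc.drop i) k.toList = true) := by
  induction bucket generalizing f with
  | nil => simp
  | cons x bucket ih =>
    rw [List.foldl_cons]
    by_cases hsw : PySem.Chars.startswith (doc.drop i) x.toList = true
    · by_cases hcx : PySem.Set.contains f x = true
      · have hxf : x ∈ f := (PySem.Set.contains_iff f x).1 hcx
        rw [if_neg (by rw [hcx]; simp), ih]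
        constructor
        · rintro (h | h)
          · exact Or.inl h
          · exact Or.inr ⟨List.mem_cons_of_mem _ h.1, h.2⟩
        · rintro (h | ⟨hm, hs⟩)
          · exact Or.inl h
          · rcases List.mem_cons.1 hm with rfl | hm
            · exact Or.inl hxf
            · exact Or.inr ⟨hm, hs⟩
      · have hcx' : PySem.Set.contains f x = false := by simpa using hcx
        rw [if_pos (by rw [hcx', hsw]; rfl), ih]
        constructor
        · rintro (h | h)
          · rcases (PySem.Set.mem_add f x k).1 h with h | rfl
            · exact Or.inl h
            · exact Or.inr ⟨by simp, hsw⟩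
          · exact Or.inr ⟨List.mem_cons_of_mem _ h.1, h.2⟩
        · rintro (h | ⟨hm, hs⟩)
          · exact Or.inl ((PySem.Set.mem_add f x k).2 (Or.inl h))
          · rcases List.mem_cons.1 hm with heq | hm
            · exact Or.inl ((PySem.Set.mem_add f x k).2 (Or.inr heq))
            · exact Or.inr ⟨hm, hs⟩
    · have hsw' : PySem.Chars.startswith (doc.drop i) x.toList = false := by simpa using hsw
      rw [if_neg (by rw [hsw']; simp), ih]
      constructor
      · rintro (h | h)
        · exact Or.inl h
        · exact Or.inr ⟨List.mem_cons_of_mem _ h.1, h.2⟩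
      · rintro (h | ⟨hm, hs⟩)
        · exact Or.inl h
        · rcases List.mem_cons.1 hm with rfl | hm
          · exact absurd (hsw' ▸ hs) (by simp)
          · exact Or.inr ⟨hm, hs⟩

-- The whole scan over any list of (index, char) pairs.
theorem mem_outer_scan (doc : List Char) (byfirst : PySem.Dict Char (List String))
    (L : List (Int × Char)) (f : PySem.Set String) (k : String) :
    k ∈ L.foldl (fun f ic =>
        (byfirst.getD ic.2 []).foldl (fun f k =>
          if !(PySem.Set.contains f k)
              && PySem.Chars.startswith (doc.drop ic.1.toNat) k.toList
          then PySem.Set.add f k else f) f) f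
      ↔ k ∈ f ∨ ∃ p ∈ L, k ∈ byfirst.getD p.2 []
          ∧ PySem.Chars.startswith (doc.drop p.1.toNat) k.toList = true := by
  induction L generalizing f with
  | nil => simp
  | cons q L ih =>
    rw [List.foldl_cons, ih, mem_inner_scan]
    constructor
    · rintro ((h | h) | ⟨p, hp, h⟩)
      · exact Or.inl h
      · exact Or.inr ⟨q, List.mem_cons_self, h⟩
      · exact Or.inr ⟨p, List.mem_cons_of_mem _ hp, h⟩
    · rintro (h | ⟨p, hp, h⟩)
      · exact Or.inl (Or.inl h)
      · rcases List.mem_cons.1 hp with rfl | hp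
        · exact Or.inl (Or.inr h)
        · exact Or.inr ⟨p, hp, h⟩

-- B's `found` holds exactly the multiword patterns occurring somewhere in doc.
theorem mem_found (doc : List Char) (multis : List String) (k : String)
    (hne : k.toList ≠ []) :
    k ∈ (PySem.List.enumerate doc).foldl (fun f ic =>
        ((multis.foldl (fun d k => d.modify (k.toList.headD ' ') [] (fun l => l ++ [k]))
            PySem.Dict.empty).getD ic.2 []).foldl (fun f k =>
          if !(PySem.Set.contains f k)
              && PySem.Chars.startswith (doc.drop ic.1.toNat) k.toList
          then PySem.Set.add f k else f) f) PySem.Set.empty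
      ↔ k ∈ multis ∧ PySem.Chars.isIn k.toList doc = true := by
  rw [mem_outer_scan]
  rw [← PySem.Chars.exists_prefix_drop_iff_isIn]
  simp only [show (PySem.Set.empty : PySem.Set String) = [] from rfl, List.not_mem_nil,
    false_or]
  constructor
  · rintro ⟨p, hp, hb, hsw⟩
    have hk := (mem_bucket multis p.2 k).1 hb
    exact ⟨hk.1, ⟨p.1.toNat, (PySem.Chars.startswith_iff _ _).1 hsw⟩⟩
  · rintro ⟨hk, j, hpre⟩
    obtain ⟨c, t, hct⟩ : ∃ c t, k.toList = c :: t := by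
      cases h : k.toList with
      | nil => exact absurd h hne
      | cons c t => exact ⟨c, t, rfl⟩
    have hdropne : doc.drop j ≠ [] := by
      intro h
      rw [h, hct] at hpre
      exact (List.cons_ne_nil c t) (List.prefix_nil.1 hpre)
    have hj : j < doc.length := by
      by_contra h
      exact hdropne (List.drop_eq_nil_iff.2 (by omega))
    have hhead : doc[j] = c := by
      obtain ⟨rest, hr⟩ := hpre
      have : doc.drop j = c :: (t ++ rest) := by rw [← hr, hct]; simp
      have h1 : doc.drop j = doc[j] :: doc.drop (j+1) := List.drop_eq_getElem_cons hj
      have h2 := h1.symm.trans this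
      exact (List.cons_eq_cons.1 h2).1
    refine ⟨((j : Int), doc[j]), ?_, ?_, ?_⟩
    · rw [PySem.List.mem_enumerate_iff]
      exact ⟨j, hj, by simp⟩
    · rw [mem_bucket]
      exact ⟨hk, by rw [hct, hhead]; rfl⟩
    · rw [PySem.Chars.startswith_iff]
      simpa using hpre

-- Bool form of mem_found, for patterns that are in multis.
theorem contains_found (doc : List Char) (multis : List String) (k : String)
    (hne : k.toList ≠ []) (hk : k ∈ multis) :
    PySem.Set.contains ((PySem.List.enumerate doc).foldl (fun f ic =>
        ((multis.foldl (fun d k => d.modify (k.toList.headD ' ') [] (fun l => l ++ [k]))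
            PySem.Dict.empty).getD ic.2 []).foldl (fun f k =>
          if !(PySem.Set.contains f k)
              && PySem.Chars.startswith (doc.drop ic.1.toNat) k.toList
          then PySem.Set.add f k else f) f) PySem.Set.empty) k
      = PySem.Chars.isIn k.toList doc := by
  set F := (PySem.List.enumerate doc).foldl (fun f ic =>
        ((multis.foldl (fun d k => d.modify (k.toList.headD ' ') [] (fun l => l ++ [k]))
            PySem.Dict.empty).getD ic.2 []).foldl (fun f k =>
          if !(PySem.Set.contains f k)
              && PySem.Chars.startswith (doc.drop ic.1.toNat) k.toList
          then PySem.Set.add f k else f) f) (PySem.Set.empty : PySem.Set String) with hF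
  by_cases hm : k ∈ F
  · rw [(PySem.Set.contains_iff F k).2 hm]
    exact (((mem_found doc multis k hne).1 (hF ▸ hm)).2).symm
  · have hcF : PySem.Set.contains F k = false := by
      cases hb : PySem.Set.contains F k
      · rfl
      · exact absurd ((PySem.Set.contains_iff F k).1 hb) hm
    rw [hcF]
    cases hi : PySem.Chars.isIn k.toList doc
    · rfl
    · exact absurd (hF ▸ ((mem_found doc multis k hne).2 ⟨hk, hi⟩)) hm

-- ===== VERDICT (by name: the statement is the Claim_ definition above) =====
theorem is_in_ngram_spec : Claim_equal_is_in_ngram := by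
  intro words dic _
  unfold Spec_is_in_ngram is_in_ngram is_in_ngram_alt
  dsimp only
  set keys := dic.map Prod.fst with hkeys
  set doc := PySem.Str.join " " words with hdoc
  set c1 : String → Bool := fun w => keys.contains w with hc1
  set mw : String → Bool := fun k =>
    decide ((PySem.Chars.splitOn k.toList [' ']).length > 1) with hmw
  set c2 : String → Bool := fun k => mw k && PySem.Str.isIn k doc with hc2
  set hits : List String := PySem.List.dedup (words.filter c1) with hhits
  set multis : List String := keys.filter mw with hmultis
  -- A's nested-if body is a single filter condition c2
  have hbody : (fun (r : PySem.Dict String Int) key =>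
      if (PySem.Chars.splitOn key.toList [' ']).length > 1 then
        (if PySem.Str.isIn key doc then r.insert key 1 else r)
      else r)
      = (fun (r : PySem.Dict String Int) key => if c2 key then r.insert key 1 else r) := by
    funext r key
    by_cases h1 : (PySem.Chars.splitOn key.toList [' ']).length > 1
    · simp [hc2, hmw, h1]
    · simp [hc2, hmw, h1]
  rw [hbody, ← List.foldl_filter, ← List.foldl_filter]
  have hempty : (PySem.Dict.empty : PySem.Dict String Int)
      = PySem.Dict.mk (([] : List String).map (fun k => (k, (1 : Int)))) := rfl
  rw [hempty, fold_insert_one]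
  have hmid : PySem.Dict.mk ((PySem.Set.update ([] : List String) (words.filter c1)).map
        (fun k => (k, (1 : Int))))
      = PySem.Dict.mk (hits.map (fun k => (k, (1 : Int)))) := by
    have : PySem.Set.update ([] : List String) (words.filter c1)
        = PySem.Set.ofList (words.filter c1) := by
      rw [PySem.Set.ofList_eq_foldl]; rfl
    rw [this, ← PySem.List.dedup_eq_ofList, ← hhits]
  rw [hmid, fold_insert_one]
  have hnd : hits.Nodup := by rw [hhits]; exact PySem.List.nodup_dedup _
  have hseen : (PySem.Set.ofList hits : List String) = hits :=
    PySem.Set.ofList_eq_self_of_nodup _ hnd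
  -- B's filter over multis equals A's filter condition over keys, minus the seen hits
  have e1 : multis.filter (fun k =>
        !(PySem.Set.contains (PySem.Set.ofList hits) k)
          && PySem.Set.contains ((PySem.List.enumerate doc.toList).foldl (fun f ic =>
            ((multis.foldl (fun d k =>
                d.modify (k.toList.headD ' ') [] (fun l => l ++ [k]))
              PySem.Dict.empty).getD ic.2 []).foldl (fun f k =>
              if !(PySem.Set.contains f k)
                  && PySem.Chars.startswith (doc.toList.drop ic.1.toNat) k.toList
              then PySem.Set.add f k else f) f) PySem.Set.empty) k)
      = multis.filter (fun k => PySem.Str.isIn k doc && !(hits.contains k)) := by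
    apply List.filter_congr
    intro k hk
    have hmwk : mw k = true := (List.mem_filter.1 (hmultis ▸ hk)).2
    have hne : k.toList ≠ [] := multiword_ne_nil k (by
      have := hmwk; rw [hmw] at this; simpa using this)
    rw [contains_found doc.toList multis k hne hk, hseen]
    simp only [PySem.Set.contains_eq_listContains, PySem.Str.isIn_eq]
    rw [Bool.and_comm]
  have e2 : multis.filter (fun k => PySem.Str.isIn k doc && !(hits.contains k))
      = keys.filter (fun k => c2 k && !(hits.contains k)) := by
    rw [hmultis, List.filter_filter]
    apply List.filter_congr
    intro k _
    simp only [hc2]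
    cases mw k <;> cases PySem.Str.isIn k doc <;> cases hits.contains k <;> rfl
  rw [e1, e2]
  have hB : PySem.List.dedup (hits ++ keys.filter (fun k => c2 k && !(hits.contains k)))
      = PySem.Set.update hits (keys.filter (fun k => c2 k && !(hits.contains k))) := by
    rw [PySem.List.dedup_eq_ofList, PySem.Set.ofList_eq_foldl, List.foldl_append,
      ← PySem.Set.ofList_eq_foldl, PySem.Set.ofList_eq_self_of_nodup _ hnd]
    rfl
  rw [hB]
  rw [update_filter_drop_seen c2 hits keys hits (fun x hx => hx)]
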